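-- pv_equiv track=rewrite | github.com/microsoft/agent-governance-toolkit | agent-governance-python/agent-os/tests/test_http_client_url_validation.py | _is_private_domain
-- ===== SOURCE A (Python) =====
-- def _is_private_domain(domain: str) -> bool:
--     private_patterns = [
--         "10.", "192.168.",
--         "172.16.", "172.17.", "172.18.", "172.19.",
--         "172.20.", "172.21.", "172.22.", "172.23.",
--         "172.24.", "172.25.", "172.26.", "172.27.",
--         "172.28.", "172.29.", "172.30.", "172.31.",
--         "internal", ".local",
--     ]
--     return any(domain.startswith(p) or domain.endswith(p) for p in private_patterns)
-- ===== SOURCE B (Python) =====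
-- def _priv_start(d: str) -> bool:
--     if d.startswith("10.") or d.startswith("192.168.") or d.startswith("internal") or d.startswith(".local"):
--         return True
--     return (len(d) >= 7 and d.startswith("172.") and d[6] == "."
--             and d[4].isdigit() and d[5].isdigit()
--             and 16 <= (ord(d[4]) - 48) * 10 + (ord(d[5]) - 48) <= 31)
--
--
-- def _priv_end(d: str) -> bool:
--     if d.endswith("10.") or d.endswith("192.168.") or d.endswith("internal") or d.endswith(".local"):
--         return True
--     t = d[-7:]
--     return (len(t) == 7 and t.startswith("172.") and t[6] == "."
--             and t[4].isdigit() and t[5].isdigit()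
--             and 16 <= (ord(t[4]) - 48) * 10 + (ord(t[5]) - 48) <= 31)
--
--
-- def _is_private_domain(domain: str) -> bool:
--     return _priv_start(domain) or _priv_end(domain)
-- ===== Notes on version B (the rewrite author's own statement) =====
-- stated objective: alternative
-- what changed: Replaces the 20-pattern any() scan with direct anchored checks: the sixteen 172.16.-172.31. patterns are folded into a single numeric range test on the two digit characters of the 7-character window at the start of the string and at its end (via d[-7:]).
import Mathlib
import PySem

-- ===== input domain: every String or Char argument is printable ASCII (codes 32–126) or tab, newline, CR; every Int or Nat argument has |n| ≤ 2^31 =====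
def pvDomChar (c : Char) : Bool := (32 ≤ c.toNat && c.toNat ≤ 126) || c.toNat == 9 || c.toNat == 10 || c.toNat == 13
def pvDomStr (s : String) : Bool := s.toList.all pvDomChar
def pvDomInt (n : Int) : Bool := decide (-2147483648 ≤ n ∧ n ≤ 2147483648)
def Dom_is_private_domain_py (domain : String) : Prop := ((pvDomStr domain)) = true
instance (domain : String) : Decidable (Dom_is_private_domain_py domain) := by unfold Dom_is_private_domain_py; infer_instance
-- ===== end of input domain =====

-- B replaces A's 20-pattern any() scan by direct anchored checks, folding the sixteen
-- "172.16."–"172.31." patterns into one numeric range test on the two digit characters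
-- (objective: alternative formulation, not claimed faster).

-- ===== PORT A =====
def is_private_domain_py (domain : String) : Bool :=
  let private_patterns : List String :=
    ["10.", "192.168.",
     "172.16.", "172.17.", "172.18.", "172.19.",
     "172.20.", "172.21.", "172.22.", "172.23.",
     "172.24.", "172.25.", "172.26.", "172.27.",
     "172.28.", "172.29.", "172.30.", "172.31.",
     "internal", ".local"]
  private_patterns.any (fun p => PySem.Str.startswith domain p || PySem.Str.endswith domain p)

-- ===== PORT B =====
-- port of Source B's _priv_start
def privStart (d : String) : Bool :=
  if PySem.Str.startswith d "10." || PySem.Str.startswith d "192.168." ||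
     PySem.Str.startswith d "internal" || PySem.Str.startswith d ".local" then
    true
  else
    decide ((7:Int) ≤ PySem.Str.len d) && PySem.Str.startswith d "172." &&
    (PySem.Str.pyGet? d 6 == some '.') &&
    (match PySem.Str.pyGet? d 4, PySem.Str.pyGet? d 5 with
     | some c4, some c5 =>
        PySem.Chars.isdigit c4 && PySem.Chars.isdigit c5 &&
        decide (16 ≤ ((c4.toNat:Int) - 48) * 10 + ((c5.toNat:Int) - 48) ∧
                ((c4.toNat:Int) - 48) * 10 + ((c5.toNat:Int) - 48) ≤ 31)
     | _, _ => false)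

-- port of Source B's _priv_end  (t = d[-7:] is PySem.Str.slice d (some (-7)) none)
def privEnd (d : String) : Bool :=
  if PySem.Str.endswith d "10." || PySem.Str.endswith d "192.168." ||
     PySem.Str.endswith d "internal" || PySem.Str.endswith d ".local" then
    true
  else
    let t := PySem.Str.slice d (some (-7)) none
    decide (PySem.Str.len t = 7) && PySem.Str.startswith t "172." &&
    (PySem.Str.pyGet? t 6 == some '.') &&
    (match PySem.Str.pyGet? t 4, PySem.Str.pyGet? t 5 with
     | some c4, some c5 =>
        PySem.Chars.isdigit c4 && PySem.Chars.isdigit c5 &&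
        decide (16 ≤ ((c4.toNat:Int) - 48) * 10 + ((c5.toNat:Int) - 48) ∧
                ((c4.toNat:Int) - 48) * 10 + ((c5.toNat:Int) - 48) ≤ 31)
     | _, _ => false)

def is_private_domain_py_alt (domain : String) : Bool :=
  privStart domain || privEnd domain

-- ===== PRECONDITION & SPEC =====
def Spec_is_private_domain_py (domain : String) (out : Bool) : Prop := out = is_private_domain_py_alt domain
instance (domain : String) (out : Bool) : Decidable (Spec_is_private_domain_py domain out) := by unfold Spec_is_private_domain_py; infer_instance

-- ===== CLAIM (what is proved, stated in full; the proofs are below) =====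
def Claim_equal_is_private_domain_py : Prop := ∀ (domain : String), Dom_is_private_domain_py domain → Spec_is_private_domain_py domain (is_private_domain_py domain)

-- ===== LEMMAS AND PROOFS =====

theorem char_eq_iff_toNat (a b : Char) : a = b ↔ a.toNat = b.toNat := by
  constructor
  · rintro rfl; rfl
  · intro h; apply Char.ext; apply UInt32.toNat_inj.mp; exact h

theorem char_le_iff_toNat (a b : Char) : a ≤ b ↔ a.toNat ≤ b.toNat := by
  rw [Char.le_def, UInt32.le_iff_toNat_le]; rfl

-- the condition the sixteen "172.NN." patterns encode, on a 7-character window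
def core7 (t : List Char) : Bool :=
  match t with
  | [c0,c1,c2,c3,c4,c5,c6] =>
      c0 == '1' && c1 == '7' && c2 == '2' && c3 == '.' && c6 == '.' &&
      PySem.Chars.isdigit c4 && PySem.Chars.isdigit c5 &&
      decide (16 ≤ ((c4.toNat:Int) - 48) * 10 + ((c5.toNat:Int) - 48) ∧
              ((c4.toNat:Int) - 48) * 10 + ((c5.toNat:Int) - 48) ≤ 31)
  | _ => false

set_option maxHeartbeats 1000000 in
theorem eq16 (t : List Char) :
    ("172.16.".toList = t ∨
     "172.17.".toList = t ∨
     "172.18.".toList = t ∨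
     "172.19.".toList = t ∨
     "172.20.".toList = t ∨
     "172.21.".toList = t ∨
     "172.22.".toList = t ∨
     "172.23.".toList = t ∨
     "172.24.".toList = t ∨
     "172.25.".toList = t ∨
     "172.26.".toList = t ∨
     "172.27.".toList = t ∨
     "172.28.".toList = t ∨
     "172.29.".toList = t ∨
     "172.30.".toList = t ∨
     "172.31.".toList = t)
    ↔ core7 t = true := by
  match t with
  | [] => simp [core7]
  | [a] => simp [core7]
  | [a,b] => simp [core7]
  | [a,b,c] => simp [core7]
  | [a,b,c,d] => simp [core7]
  | [a,b,c,d,e] => simp [core7]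
  | [a,b,c,d,e,f] => simp [core7]
  | a::b::c::d::e::f::g::h'::r => simp [core7]
  | [c0,c1,c2,c3,c4,c5,c6] =>
    simp only [show ("172.16.".toList) = ['1','7','2','.','1','6','.'] from rfl,
      show ("172.17.".toList) = ['1','7','2','.','1','7','.'] from rfl,
      show ("172.18.".toList) = ['1','7','2','.','1','8','.'] from rfl,
      show ("172.19.".toList) = ['1','7','2','.','1','9','.'] from rfl,
      show ("172.20.".toList) = ['1','7','2','.','2','0','.'] from rfl,
      show ("172.21.".toList) = ['1','7','2','.','2','1','.'] from rfl,
      show ("172.22.".toList) = ['1','7','2','.','2','2','.'] from rfl,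
      show ("172.23.".toList) = ['1','7','2','.','2','3','.'] from rfl,
      show ("172.24.".toList) = ['1','7','2','.','2','4','.'] from rfl,
      show ("172.25.".toList) = ['1','7','2','.','2','5','.'] from rfl,
      show ("172.26.".toList) = ['1','7','2','.','2','6','.'] from rfl,
      show ("172.27.".toList) = ['1','7','2','.','2','7','.'] from rfl,
      show ("172.28.".toList) = ['1','7','2','.','2','8','.'] from rfl,
      show ("172.29.".toList) = ['1','7','2','.','2','9','.'] from rfl,
      show ("172.30.".toList) = ['1','7','2','.','3','0','.'] from rfl,
      show ("172.31.".toList) = ['1','7','2','.','3','1','.'] from rfl]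
    constructor
    · intro h
      rcases h with h|h|h|h|h|h|h|h|h|h|h|h|h|h|h|h
      all_goals replace h := h.symm
      all_goals simp only [List.cons.injEq, and_true] at h
      all_goals obtain ⟨rfl, rfl, rfl, rfl, rfl, rfl, rfl⟩ := h
      all_goals decide
    · intro h
      simp only [core7, Bool.and_eq_true, beq_iff_eq, PySem.Chars.isdigit,
        decide_eq_true_eq, char_le_iff_toNat,
        show ('0').toNat = 48 from rfl, show ('9').toNat = 57 from rfl] at h
      obtain ⟨⟨⟨⟨⟨⟨⟨rfl, rfl⟩, rfl⟩, rfl⟩, rfl⟩, hd4⟩, hd5⟩, hr⟩ := h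
      have h4 : c4.toNat = 49 ∨ c4.toNat = 50 ∨ c4.toNat = 51 := by omega
      rcases h4 with h4 | h4 | h4
      · have h5 : c5.toNat = 54 ∨ c5.toNat = 55 ∨ c5.toNat = 56 ∨ c5.toNat = 57 := by omega
        rcases h5 with h5|h5|h5|h5
        · have e4 : c4 = '1' := (char_eq_iff_toNat c4 '1').mpr h4
          have e5 : c5 = '6' := (char_eq_iff_toNat c5 '6').mpr h5
          subst e4; subst e5; exact Or.inl rfl
        · have e4 : c4 = '1' := (char_eq_iff_toNat c4 '1').mpr h4
          have e5 : c5 = '7' := (char_eq_iff_toNat c5 '7').mpr h5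
          subst e4; subst e5; exact Or.inr (Or.inl rfl)
        · have e4 : c4 = '1' := (char_eq_iff_toNat c4 '1').mpr h4
          have e5 : c5 = '8' := (char_eq_iff_toNat c5 '8').mpr h5
          subst e4; subst e5; exact Or.inr (Or.inr (Or.inl rfl))
        · have e4 : c4 = '1' := (char_eq_iff_toNat c4 '1').mpr h4
          have e5 : c5 = '9' := (char_eq_iff_toNat c5 '9').mpr h5
          subst e4; subst e5; exact Or.inr (Or.inr (Or.inr (Or.inl rfl)))
      · have h5 : c5.toNat = 48 ∨ c5.toNat = 49 ∨ c5.toNat = 50 ∨ c5.toNat = 51 ∨ c5.toNat = 52 ∨ c5.toNat = 53 ∨ c5.toNat = 54 ∨ c5.toNat = 55 ∨ c5.toNat = 56 ∨ c5.toNat = 57 := by omega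
        rcases h5 with h5|h5|h5|h5|h5|h5|h5|h5|h5|h5
        · have e4 : c4 = '2' := (char_eq_iff_toNat c4 '2').mpr h4
          have e5 : c5 = '0' := (char_eq_iff_toNat c5 '0').mpr h5
          subst e4; subst e5; exact Or.inr (Or.inr (Or.inr (Or.inr (Or.inl rfl))))
        · have e4 : c4 = '2' := (char_eq_iff_toNat c4 '2').mpr h4
          have e5 : c5 = '1' := (char_eq_iff_toNat c5 '1').mpr h5
          subst e4; subst e5; exact Or.inr (Or.inr (Or.inr (Or.inr (Or.inr (Or.inl rfl)))))
        · have e4 : c4 = '2' := (char_eq_iff_toNat c4 '2').mpr h4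
          have e5 : c5 = '2' := (char_eq_iff_toNat c5 '2').mpr h5
          subst e4; subst e5; exact Or.inr (Or.inr (Or.inr (Or.inr (Or.inr (Or.inr (Or.inl rfl))))))
        · have e4 : c4 = '2' := (char_eq_iff_toNat c4 '2').mpr h4
          have e5 : c5 = '3' := (char_eq_iff_toNat c5 '3').mpr h5
          subst e4; subst e5; exact Or.inr (Or.inr (Or.inr (Or.inr (Or.inr (Or.inr (Or.inr (Or.inl rfl)))))))
        · have e4 : c4 = '2' := (char_eq_iff_toNat c4 '2').mpr h4
          have e5 : c5 = '4' := (char_eq_iff_toNat c5 '4').mpr h5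
          subst e4; subst e5; exact Or.inr (Or.inr (Or.inr (Or.inr (Or.inr (Or.inr (Or.inr (Or.inr (Or.inl rfl))))))))
        · have e4 : c4 = '2' := (char_eq_iff_toNat c4 '2').mpr h4
          have e5 : c5 = '5' := (char_eq_iff_toNat c5 '5').mpr h5
          subst e4; subst e5; exact Or.inr (Or.inr (Or.inr (Or.inr (Or.inr (Or.inr (Or.inr (Or.inr (Or.inr (Or.inl rfl)))))))))
        · have e4 : c4 = '2' := (char_eq_iff_toNat c4 '2').mpr h4
          have e5 : c5 = '6' := (char_eq_iff_toNat c5 '6').mpr h5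
          subst e4; subst e5; exact Or.inr (Or.inr (Or.inr (Or.inr (Or.inr (Or.inr (Or.inr (Or.inr (Or.inr (Or.inr (Or.inl rfl))))))))))
        · have e4 : c4 = '2' := (char_eq_iff_toNat c4 '2').mpr h4
          have e5 : c5 = '7' := (char_eq_iff_toNat c5 '7').mpr h5
          subst e4; subst e5; exact Or.inr (Or.inr (Or.inr (Or.inr (Or.inr (Or.inr (Or.inr (Or.inr (Or.inr (Or.inr (Or.inr (Or.inl rfl)))))))))))
        · have e4 : c4 = '2' := (char_eq_iff_toNat c4 '2').mpr h4
          have e5 : c5 = '8' := (char_eq_iff_toNat c5 '8').mpr h5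
          subst e4; subst e5; exact Or.inr (Or.inr (Or.inr (Or.inr (Or.inr (Or.inr (Or.inr (Or.inr (Or.inr (Or.inr (Or.inr (Or.inr (Or.inl rfl))))))))))))
        · have e4 : c4 = '2' := (char_eq_iff_toNat c4 '2').mpr h4
          have e5 : c5 = '9' := (char_eq_iff_toNat c5 '9').mpr h5
          subst e4; subst e5; exact Or.inr (Or.inr (Or.inr (Or.inr (Or.inr (Or.inr (Or.inr (Or.inr (Or.inr (Or.inr (Or.inr (Or.inr (Or.inr (Or.inl rfl)))))))))))))
      · have h5 : c5.toNat = 48 ∨ c5.toNat = 49 := by omega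
        rcases h5 with h5|h5
        · have e4 : c4 = '3' := (char_eq_iff_toNat c4 '3').mpr h4
          have e5 : c5 = '0' := (char_eq_iff_toNat c5 '0').mpr h5
          subst e4; subst e5; exact Or.inr (Or.inr (Or.inr (Or.inr (Or.inr (Or.inr (Or.inr (Or.inr (Or.inr (Or.inr (Or.inr (Or.inr (Or.inr (Or.inr (Or.inl rfl))))))))))))))
        · have e4 : c4 = '3' := (char_eq_iff_toNat c4 '3').mpr h4
          have e5 : c5 = '1' := (char_eq_iff_toNat c5 '1').mpr h5
          subst e4; subst e5; exact Or.inr (Or.inr (Or.inr (Or.inr (Or.inr (Or.inr (Or.inr (Or.inr (Or.inr (Or.inr (Or.inr (Or.inr (Or.inr (Or.inr (Or.inr rfl))))))))))))))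

theorem prefix16 (l : List Char) :
    (PySem.Chars.startswith l "172.16.".toList ||
     PySem.Chars.startswith l "172.17.".toList ||
     PySem.Chars.startswith l "172.18.".toList ||
     PySem.Chars.startswith l "172.19.".toList ||
     PySem.Chars.startswith l "172.20.".toList ||
     PySem.Chars.startswith l "172.21.".toList ||
     PySem.Chars.startswith l "172.22.".toList ||
     PySem.Chars.startswith l "172.23.".toList ||
     PySem.Chars.startswith l "172.24.".toList ||
     PySem.Chars.startswith l "172.25.".toList ||
     PySem.Chars.startswith l "172.26.".toList ||
     PySem.Chars.startswith l "172.27.".toList ||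
     PySem.Chars.startswith l "172.28.".toList ||
     PySem.Chars.startswith l "172.29.".toList ||
     PySem.Chars.startswith l "172.30.".toList ||
     PySem.Chars.startswith l "172.31.".toList) = core7 (l.take 7) := by
  rw [Bool.eq_iff_iff, ← eq16 (l.take 7)]
  simp [PySem.Chars.startswith_iff, List.prefix_iff_eq_take, or_assoc,
    show ("172.16.".toList) = ['1','7','2','.','1','6','.'] from rfl,
      show ("172.17.".toList) = ['1','7','2','.','1','7','.'] from rfl,
      show ("172.18.".toList) = ['1','7','2','.','1','8','.'] from rfl,
      show ("172.19.".toList) = ['1','7','2','.','1','9','.'] from rfl,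
      show ("172.20.".toList) = ['1','7','2','.','2','0','.'] from rfl,
      show ("172.21.".toList) = ['1','7','2','.','2','1','.'] from rfl,
      show ("172.22.".toList) = ['1','7','2','.','2','2','.'] from rfl,
      show ("172.23.".toList) = ['1','7','2','.','2','3','.'] from rfl,
      show ("172.24.".toList) = ['1','7','2','.','2','4','.'] from rfl,
      show ("172.25.".toList) = ['1','7','2','.','2','5','.'] from rfl,
      show ("172.26.".toList) = ['1','7','2','.','2','6','.'] from rfl,
      show ("172.27.".toList) = ['1','7','2','.','2','7','.'] from rfl,
      show ("172.28.".toList) = ['1','7','2','.','2','8','.'] from rfl,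
      show ("172.29.".toList) = ['1','7','2','.','2','9','.'] from rfl,
      show ("172.30.".toList) = ['1','7','2','.','3','0','.'] from rfl,
      show ("172.31.".toList) = ['1','7','2','.','3','1','.'] from rfl]

theorem suffix16 (l : List Char) :
    (PySem.Chars.endswith l "172.16.".toList ||
     PySem.Chars.endswith l "172.17.".toList ||
     PySem.Chars.endswith l "172.18.".toList ||
     PySem.Chars.endswith l "172.19.".toList ||
     PySem.Chars.endswith l "172.20.".toList ||
     PySem.Chars.endswith l "172.21.".toList ||
     PySem.Chars.endswith l "172.22.".toList ||
     PySem.Chars.endswith l "172.23.".toList ||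
     PySem.Chars.endswith l "172.24.".toList ||
     PySem.Chars.endswith l "172.25.".toList ||
     PySem.Chars.endswith l "172.26.".toList ||
     PySem.Chars.endswith l "172.27.".toList ||
     PySem.Chars.endswith l "172.28.".toList ||
     PySem.Chars.endswith l "172.29.".toList ||
     PySem.Chars.endswith l "172.30.".toList ||
     PySem.Chars.endswith l "172.31.".toList) = core7 (l.drop (l.length - 7)) := by
  rw [Bool.eq_iff_iff, ← eq16 (l.drop (l.length - 7))]
  simp [PySem.Chars.endswith_iff, List.suffix_iff_eq_drop, or_assoc,
    show ("172.16.".toList) = ['1','7','2','.','1','6','.'] from rfl,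
      show ("172.17.".toList) = ['1','7','2','.','1','7','.'] from rfl,
      show ("172.18.".toList) = ['1','7','2','.','1','8','.'] from rfl,
      show ("172.19.".toList) = ['1','7','2','.','1','9','.'] from rfl,
      show ("172.20.".toList) = ['1','7','2','.','2','0','.'] from rfl,
      show ("172.21.".toList) = ['1','7','2','.','2','1','.'] from rfl,
      show ("172.22.".toList) = ['1','7','2','.','2','2','.'] from rfl,
      show ("172.23.".toList) = ['1','7','2','.','2','3','.'] from rfl,
      show ("172.24.".toList) = ['1','7','2','.','2','4','.'] from rfl,
      show ("172.25.".toList) = ['1','7','2','.','2','5','.'] from rfl,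
      show ("172.26.".toList) = ['1','7','2','.','2','6','.'] from rfl,
      show ("172.27.".toList) = ['1','7','2','.','2','7','.'] from rfl,
      show ("172.28.".toList) = ['1','7','2','.','2','8','.'] from rfl,
      show ("172.29.".toList) = ['1','7','2','.','2','9','.'] from rfl,
      show ("172.30.".toList) = ['1','7','2','.','3','0','.'] from rfl,
      show ("172.31.".toList) = ['1','7','2','.','3','1','.'] from rfl]

theorem bool_if_true_left (c x : Bool) : (if c then true else x) = (c || x) := by
  cases c <;> simp

-- B's start-side else branch computes core7 on the first 7 characters
theorem belse_start_aux (l : List Char) :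
    (decide ((7:Int) ≤ (l.length:Int)) && PySem.Chars.startswith l "172.".toList &&
     (l[(6:Nat)]? == some '.') &&
     (match l[(4:Nat)]?, l[(5:Nat)]? with
      | some c4, some c5 =>
         PySem.Chars.isdigit c4 && PySem.Chars.isdigit c5 &&
         decide (16 ≤ ((c4.toNat:Int) - 48) * 10 + ((c5.toNat:Int) - 48) ∧
                 ((c4.toNat:Int) - 48) * 10 + ((c5.toNat:Int) - 48) ≤ 31)
      | _, _ => false)) = core7 (l.take 7) := by
  rcases l with _|⟨c0,_|⟨c1,_|⟨c2,_|⟨c3,_|⟨c4,_|⟨c5,_|⟨c6,r⟩⟩⟩⟩⟩⟩⟩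
  case cons.cons.cons.cons.cons.cons.cons =>
    have h7 : (7:Int) ≤ (r.length:Int) + 1 + 1 + 1 + 1 + 1 + 1 + 1 := by omega
    simp [core7, PySem.Chars.startswith, List.isPrefixOf_cons₂, h7,
      show "172.".toList = ['1','7','2','.'] from rfl, BEq.comm, Bool.and_assoc]
  all_goals simp [core7]

theorem belse_start (d : String) :
    (decide ((7:Int) ≤ PySem.Str.len d) && PySem.Str.startswith d "172." &&
     (PySem.Str.pyGet? d 6 == some '.') &&
     (match PySem.Str.pyGet? d 4, PySem.Str.pyGet? d 5 with
      | some c4, some c5 =>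
         PySem.Chars.isdigit c4 && PySem.Chars.isdigit c5 &&
         decide (16 ≤ ((c4.toNat:Int) - 48) * 10 + ((c5.toNat:Int) - 48) ∧
                 ((c4.toNat:Int) - 48) * 10 + ((c5.toNat:Int) - 48) ≤ 31)
      | _, _ => false)) = core7 (d.toList.take 7) := by
  rw [show ((6:Int)) = ((6:Nat):Int) from rfl, show ((4:Int)) = ((4:Nat):Int) from rfl,
      show ((5:Int)) = ((5:Nat):Int) from rfl]
  simp only [PySem.Str.pyGet?_natCast, PySem.Str.len_eq, PySem.Str.startswith_eq]
  exact belse_start_aux d.toList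

-- B's end-side else branch computes core7 on the last 7 characters
theorem belse_end_aux (t : List Char) :
    (decide ((t.length:Int) = 7) && PySem.Chars.startswith t "172.".toList &&
     (t[(6:Nat)]? == some '.') &&
     (match t[(4:Nat)]?, t[(5:Nat)]? with
      | some c4, some c5 =>
         PySem.Chars.isdigit c4 && PySem.Chars.isdigit c5 &&
         decide (16 ≤ ((c4.toNat:Int) - 48) * 10 + ((c5.toNat:Int) - 48) ∧
                 ((c4.toNat:Int) - 48) * 10 + ((c5.toNat:Int) - 48) ≤ 31)
      | _, _ => false)) = core7 t := by
  rcases t with _|⟨c0,_|⟨c1,_|⟨c2,_|⟨c3,_|⟨c4,_|⟨c5,_|⟨c6,_|⟨c7,r⟩⟩⟩⟩⟩⟩⟩⟩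
  case cons.cons.cons.cons.cons.cons.cons.nil =>
    simp [core7, PySem.Chars.startswith, List.isPrefixOf_cons₂,
      show "172.".toList = ['1','7','2','.'] from rfl, BEq.comm, Bool.and_assoc]
  case cons.cons.cons.cons.cons.cons.cons.cons =>
    have h8 : ¬((r.length:Int) + 1 + 1 + 1 + 1 + 1 + 1 + 1 + 1 = 7) := by omega
    simp [core7, h8]
  all_goals simp [core7]

theorem belse_end (d : String) :
    (let t := PySem.Str.slice d (some (-7)) none
     decide (PySem.Str.len t = 7) && PySem.Str.startswith t "172." &&
     (PySem.Str.pyGet? t 6 == some '.') &&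
     (match PySem.Str.pyGet? t 4, PySem.Str.pyGet? t 5 with
      | some c4, some c5 =>
         PySem.Chars.isdigit c4 && PySem.Chars.isdigit c5 &&
         decide (16 ≤ ((c4.toNat:Int) - 48) * 10 + ((c5.toNat:Int) - 48) ∧
                 ((c4.toNat:Int) - 48) * 10 + ((c5.toNat:Int) - 48) ≤ 31)
      | _, _ => false)) = core7 (d.toList.drop (d.toList.length - 7)) := by
  rw [show ((6:Int)) = ((6:Nat):Int) from rfl, show ((4:Int)) = ((4:Nat):Int) from rfl,
      show ((5:Int)) = ((5:Nat):Int) from rfl]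
  simp only [PySem.Str.pyGet?_natCast, PySem.Str.len_eq, PySem.Str.startswith_eq,
    PySem.Str.slice, PySem.Chars.slice, String.toList_ofList,
    PySem.List.slice_from_neg_ofNat d.toList 7 (by omega)]
  exact belse_end_aux (d.toList.drop (d.toList.length - 7))

theorem privStart_eq (d : String) :
    privStart d =
      (PySem.Chars.startswith d.toList "10.".toList ||
       PySem.Chars.startswith d.toList "192.168.".toList ||
       PySem.Chars.startswith d.toList "internal".toList ||
       PySem.Chars.startswith d.toList ".local".toList ||
       core7 (d.toList.take 7)) := by
  unfold privStart
  rw [bool_if_true_left, belse_start d]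
  simp [PySem.Str.startswith_eq, Bool.or_assoc]

theorem privEnd_eq (d : String) :
    privEnd d =
      (PySem.Chars.endswith d.toList "10.".toList ||
       PySem.Chars.endswith d.toList "192.168.".toList ||
       PySem.Chars.endswith d.toList "internal".toList ||
       PySem.Chars.endswith d.toList ".local".toList ||
       core7 (d.toList.drop (d.toList.length - 7))) := by
  unfold privEnd
  rw [bool_if_true_left, belse_end d]
  simp [PySem.Str.endswith_eq, Bool.or_assoc]

set_option maxHeartbeats 2000000 in
theorem main_eq (d : String) : is_private_domain_py d = is_private_domain_py_alt d := by
  unfold is_private_domain_py is_private_domain_py_alt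
  rw [privStart_eq, privEnd_eq, ← prefix16 d.toList, ← suffix16 d.toList]
  simp only [List.any_cons, List.any_nil, Bool.or_false,
    PySem.Str.startswith_eq, PySem.Str.endswith_eq]
  ac_rfl

-- ===== VERDICT (by name: the statement is the Claim_ definition above) =====
theorem is_private_domain_py_spec : Claim_equal_is_private_domain_py := by
  intro d _
  unfold Spec_is_private_domain_py
  exact main_eq d
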